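-- pv_equiv track=rewrite | github.com/Ultimate-hackman/steam-time-count | discord total/counter.py | formFinder
-- ===== SOURCE A (Python) =====
-- def formFinder(string, output):
--     finalOutput = 0
--
--     for i in string:
--         if i == "-":
--             if string[string.index(i) + 1] == "h":
--                 finalOutput = output * 60
--             else:
--                 finalOutput = output
--
--     return finalOutput
-- ===== SOURCE B (Python) =====
-- def formFinder(string, output):
--     _, sep, tail = string.partition("-")
--     if not sep:
--         return 0
--     return output * 60 if tail[0] == "h" else output
-- ===== Notes on version B (the rewrite author's own statement) =====
-- stated objective: simpler
-- what changed: Replaces the loop over every character (which re-scans for the first dash via string.index at each dash) with one str.partition('-') call and a single check of the first character of the tail.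
-- outside the precondition, e.g. on formFinder('ab-', 1): A raises IndexError, B raises IndexError
import Mathlib
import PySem

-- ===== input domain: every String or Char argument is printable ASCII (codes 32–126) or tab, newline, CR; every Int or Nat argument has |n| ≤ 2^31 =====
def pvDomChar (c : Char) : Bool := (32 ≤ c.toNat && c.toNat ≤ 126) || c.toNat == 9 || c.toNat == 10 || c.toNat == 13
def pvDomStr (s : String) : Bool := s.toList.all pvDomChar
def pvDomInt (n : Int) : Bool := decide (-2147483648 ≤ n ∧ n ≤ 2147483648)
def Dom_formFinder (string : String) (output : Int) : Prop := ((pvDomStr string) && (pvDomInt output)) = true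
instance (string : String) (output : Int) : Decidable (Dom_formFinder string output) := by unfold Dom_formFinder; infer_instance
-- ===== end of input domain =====

-- B replaces A's per-character loop (which rescans for the first dash at every dash) by one
-- str.partition("-") and a single check of the tail's first character; objective: simpler.


-- ===== PORT A =====
-- for i in string: if i == "-": finalOutput := (output*60 if string[string.index(i)+1]=="h" else output)
-- (i is '-' in that branch, so string.index(i) is the first dash: PySem.Str.find string "-";
--  the none case of pyGet? is Python's IndexError, excluded by Pre_)
def formFinder (string : String) (output : Int) : Int :=
  string.toList.foldl
    (fun finalOutput i =>
      if i = '-' then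
        match PySem.Str.pyGet? string (PySem.Str.find string "-" + 1) with
        | some ch => if ch = 'h' then output * 60 else output
        | none => finalOutput
      else finalOutput) 0

-- ===== PORT B =====
-- hand port of str.partition("-") for the single-char separator "-": exact — returns the part
-- before the first '-', whether a '-' was found, and the part after it
def partitionDash (l : List Char) : List Char × Bool × List Char :=
  match l with
  | [] => ([], false, [])
  | c :: t =>
    if c = '-' then ([], true, t)
    else
      let r := partitionDash t
      (c :: r.1, r.2.1, r.2.2)

-- _, sep, tail = string.partition("-"); 0 if sep empty else by tail[0]
-- (tail[0] on empty tail is Python's IndexError, excluded by Pre_)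
def formFinder_alt (string : String) (output : Int) : Int :=
  let r := partitionDash string.toList
  if r.2.1 = false then 0
  else
    match r.2.2 with
    | h :: _ => if h = 'h' then output * 60 else output
    | [] => 0

-- ===== PRECONDITION & SPEC =====
-- Pre_ excludes exactly the strings whose first '-' is the last character: there A (and B) raise IndexError.
def Pre_formFinder (string : String) (output : Int) : Prop :=
  PySem.Str.find string "-" = -1 ∨ PySem.Str.find string "-" + 1 < PySem.Str.len string
instance (string : String) (output : Int) : Decidable (Pre_formFinder string output) := by unfold Pre_formFinder; infer_instance
def pvWitness_formFinder : String × Int := ("a-h", 2)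

def Spec_formFinder (string : String) (output : Int) (out : Int) : Prop := out = formFinder_alt string output
instance (string : String) (output : Int) (out : Int) : Decidable (Spec_formFinder string output out) := by unfold Spec_formFinder; infer_instance

-- ===== CLAIM (what is proved, stated in full; the proofs are below) =====
def Claim_equal_formFinder : Prop := ∀ (string : String) (output : Int), Dom_formFinder string output → Pre_formFinder string output → Spec_formFinder string output (formFinder string output)

-- ===== LEMMAS AND PROOFS =====

-- A's loop body assigns a value independent of the accumulator, so the loop is "any dash?"
theorem foldl_const_dash (l : List Char) (v : Int) (init : Int) :
    l.foldl (fun acc c => if c = '-' then v else acc) init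
      = if l.any (fun c => c == '-') then v else init := by
  induction l generalizing init with
  | nil => rfl
  | cons c t ih =>
    by_cases hc : c = '-' <;> simp [hc, ih]

-- a list containing a dash decomposes at its first dash
theorem exists_decomp (l : List Char) (h : '-' ∈ l) :
    ∃ p t, l = p ++ '-' :: t ∧ '-' ∉ p := by
  induction l with
  | nil => cases h
  | cons c t ih =>
    by_cases hc : c = '-'
    · exact ⟨[], t, by simp [hc], by simp⟩
    · have ht : '-' ∈ t := by
        rcases List.mem_cons.mp h with h1 | h1
        · exact absurd h1.symm hc
        · exact h1
      obtain ⟨p, t', he, hp⟩ := ih ht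
      exact ⟨c :: p, t', by simp [he], by simp [hp]; exact Ne.symm hc⟩

theorem partitionDash_no_dash (l : List Char) (h : '-' ∉ l) :
    partitionDash l = (l, false, []) := by
  induction l with
  | nil => rfl
  | cons c t ih =>
    have hc : c ≠ '-' := fun hc => h (by simp [hc])
    have ht : '-' ∉ t := fun ht => h (List.mem_cons_of_mem _ ht)
    simp [partitionDash, hc, ih ht]

theorem partitionDash_decomp (p t : List Char) (hp : '-' ∉ p) :
    partitionDash (p ++ '-' :: t) = (p, true, t) := by
  induction p with
  | nil => simp [partitionDash]
  | cons c q ih =>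
    have hc : c ≠ '-' := fun hc => hp (by simp [hc])
    have hq : '-' ∉ q := fun hq => hp (List.mem_cons_of_mem _ hq)
    simp [partitionDash, hc, ih hq]

-- the first dash of p ++ '-'::t with '-' ∉ p is at index p.length
theorem find_decomp (p t : List Char) (hp : '-' ∉ p) :
    PySem.Chars.find (p ++ '-' :: t) ['-'] = (p.length : Int) := by
  set l := p ++ '-' :: t with hl
  have hinf : ['-'] <:+: l := by
    rw [List.singleton_infix_iff]; simp [hl]
  have hnn : 0 ≤ PySem.Chars.find l ['-'] := (PySem.Chars.find_nonneg_iff l ['-']).mpr hinf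
  obtain ⟨hpre, hmin⟩ := PySem.Chars.find_spec hnn
  have hdropP : ['-'] <+: l.drop p.length := by
    rw [hl, List.drop_left]; exact ⟨t, rfl⟩
  have hle : (PySem.Chars.find l ['-']).toNat ≤ p.length := by
    by_contra hgt
    exact hmin p.length (by omega) hdropP
  have hge : ¬ (PySem.Chars.find l ['-']).toNat < p.length := by
    intro hlt
    obtain ⟨s, hs⟩ := hpre
    have hget : l[(PySem.Chars.find l ['-']).toNat]? = some '-' := by
      have hd : l.drop (PySem.Chars.find l ['-']).toNat = '-' :: s := by simpa using hs.symm
      have h0 : (l.drop (PySem.Chars.find l ['-']).toNat)[0]? = l[(PySem.Chars.find l ['-']).toNat + 0]? :=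
        List.getElem?_drop
      rw [hd] at h0
      simpa using h0.symm
    have hgetP : l[(PySem.Chars.find l ['-']).toNat]? = p[(PySem.Chars.find l ['-']).toNat]? := by
      rw [hl, List.getElem?_append_left hlt]
    rw [hget] at hgetP
    have : '-' ∈ p := List.mem_of_getElem? hgetP.symm
    exact hp this
  omega

-- ===== VERDICT (by name: the statement is the Claim_ definition above) =====
theorem formFinder_spec : Claim_equal_formFinder := by
  intro s out _ pre
  unfold Spec_formFinder formFinder formFinder_alt
  by_cases hmem : '-' ∈ s.toList
  · obtain ⟨p, t, he, hp⟩ := exists_decomp s.toList hmem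
    have hfind : PySem.Str.find s "-" = (p.length : Int) := by
      simp only [PySem.Str.find_eq]
      rw [show ("-".toList) = ['-'] from rfl, he]
      exact find_decomp p t hp
    -- Pre_ rules out empty tail
    have hne : PySem.Str.find s "-" ≠ -1 := by rw [hfind]; omega
    have hlt : PySem.Str.find s "-" + 1 < PySem.Str.len s := pre.resolve_left hne
    have htne : t ≠ [] := by
      intro ht
      subst ht
      rw [hfind] at hlt
      have hlen : PySem.Str.len s = (p.length : Int) + 1 := by
        simp [PySem.Str.len_eq, he]
      omega
    obtain ⟨h1, rest, rfl⟩ : ∃ h1 rest, t = h1 :: rest := by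
      cases t with
      | nil => exact absurd rfl htne
      | cons a b => exact ⟨a, b, rfl⟩
    -- evaluate A's lookup: char after the first dash is h1
    have hget : PySem.Str.pyGet? s (PySem.Str.find s "-" + 1) = some h1 := by
      rw [hfind]
      simp only [PySem.Str.pyGet?_eq]
      rw [he, show p ++ '-' :: h1 :: rest = (p ++ ['-']) ++ h1 :: rest by simp,
        show (p.length : Int) + 1 = ((p ++ ['-']).length : Int) by simp]
      exact PySem.List.pyGet?_append_length _ _ _
    have hany : s.toList.any (fun c => c == '-') = true :=
      List.any_eq_true.mpr ⟨'-', hmem, by decide⟩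
    simp only [hget]
    rw [foldl_const_dash, hany, he, partitionDash_decomp p (h1 :: rest) hp]
    simp
  · -- no dash: A's loop never fires, B's partition finds no separator
    rw [PySem.List.foldl_congr_mem s.toList _ (fun acc _ => acc) 0
      (by intro acc c hc
          have hne : c ≠ '-' := fun hce => hmem (hce ▸ hc)
          simp [hne])]
    rw [PySem.List.foldl_ignore]
    rw [partitionDash_no_dash s.toList hmem]
    simp
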